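-- pv_equiv track=rewrite | github.com/ipc2023-learning/repo03 | learning/learning-aleph/utils.py | transform_hard_rule
-- ===== SOURCE A (Python) =====
-- def transform_hard_rule(rule, class_args):
--
--     if ":-" not in rule:
--         return "True"
--
--     rule_tuples = rule[:-1].split(":-")[1].split(", ")# remove last argument, which is the task
--
--     free_vars_args = {}
--     num_free_vars_args = 0
--     for (i, r) in enumerate(rule_tuples):
--         r = ",".join(r.split(",")[:-1]).replace("'", "")
--         predicates = r.split("),")
--         for pred in predicates:
--             if pred.startswith("("):
--                 pred = pred[1:]
--             if not pred:
--                 continue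
--
--             pred_name, args = pred.replace(")", "").split("(")
--
--             for arg in args.split(","):
--                 if arg in class_args:
--                     continue
--                 if not arg in free_vars_args:
--                     num_free_vars_args += 1
--                     id_arg = num_free_vars_args
--                     first_time = i
--                 else:
--                     (id_arg, first_time, _) = free_vars_args[arg]
--
--                 free_vars_args[arg] = (id_arg, first_time, i)
--
--     new_rule_tuples = []
--     for i, r in enumerate(rule_tuples):
--         r = ",".join(r.split(",")[:-1]).replace("'", "") +  ")" # remove last argument, which is the task
--         predicates = r.split("),")
--         for pred in predicates:
--             if pred.startswith("("):
--                 pred = pred[1:]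
--             if not pred:
--                 continue
--             pred_name, args = pred.replace(")", "").split("(")
--
--             new_args = []
--             for arg in args.split(","):
--                 if arg in class_args:
--                     new_args.append("?arg{}".format(class_args.index(arg)))
--                 else:
--                     (id_arg, first_time, last_time) = free_vars_args[arg]
--                     if first_time == last_time:
--                         name_arg = "_"
--                     else:
--                         name_arg = "?fv{}".format(id_arg)
--
--                     new_args.append(name_arg)
--
--             new_rule_tuples.append("{}({})".format(pred_name, ", ".join(new_args)))
--
--     return ",".join(new_rule_tuples)
-- ===== SOURCE B (Python) =====
-- def transform_hard_rule(rule, class_args):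
--
--     if ":-" not in rule:
--         return "True"
--
--     rule_tuples = rule[:-1].split(":-")[1].split(", ")
--
--     # parse once into flat entries (tuple_index, pred_name, [args])
--     entries = []
--     for i, r in enumerate(rule_tuples):
--         r = ",".join(r.split(",")[:-1]).replace("'", "")
--         for pred in r.split("),"):
--             if pred.startswith("("):
--                 pred = pred[1:]
--             if not pred:
--                 continue
--             pred_name, args = pred.replace(")", "").split("(")
--             entries.append((i, pred_name, args.split(",")))
--
--     # occurrence list of free (non-class) variables, in textual order
--     occ = [(i, a) for (i, _, al) in entries for a in al if a not in class_args]
--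
--     # distinct free vars in first-occurrence order: their position gives the ?fv id
--     seen = []
--     for _, a in occ:
--         if a not in seen:
--             seen.append(a)
--
--     # free vars that occur in at least two distinct rule tuples get a name, others '_'
--     multi = {a for (i, a) in occ for (j, b) in occ if b == a and j != i}
--
--     def render(a):
--         if a in class_args:
--             return "?arg{}".format(class_args.index(a))
--         if a in multi:
--             return "?fv{}".format(seen.index(a) + 1)
--         return "_"
--
--     return ",".join("{}({})".format(name, ", ".join(render(a) for a in al))
--                     for (_, name, al) in entries)
-- ===== Notes on version B (the rewrite author's own statement) =====
-- stated objective: alternative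
-- what changed: B replaces A's mutable dict of (id, first, last) triples and counter, rebuilt over two full string-parsing passes, by one parse into flat (tuple_index, name, args) entries plus three derived read-only structures: a flat occurrence list, a first-occurrence dedup order list giving the ?fv ids, and a set of variables spanning two distinct tuples deciding '_' vs '?fv'; emission maps over the stored entries.
import Mathlib
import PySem

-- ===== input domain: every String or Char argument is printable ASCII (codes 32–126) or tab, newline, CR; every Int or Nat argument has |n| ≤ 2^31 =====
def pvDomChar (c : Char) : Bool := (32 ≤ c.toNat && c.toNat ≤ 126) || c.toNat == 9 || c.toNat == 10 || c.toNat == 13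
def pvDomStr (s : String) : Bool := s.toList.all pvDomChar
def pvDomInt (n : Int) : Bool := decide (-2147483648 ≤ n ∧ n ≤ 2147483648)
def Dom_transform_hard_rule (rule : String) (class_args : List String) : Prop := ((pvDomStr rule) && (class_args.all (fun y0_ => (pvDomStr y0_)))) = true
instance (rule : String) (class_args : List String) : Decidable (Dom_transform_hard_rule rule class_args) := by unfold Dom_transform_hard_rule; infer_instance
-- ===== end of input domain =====

-- B replaces A's mutable dict of (id, first, last) triples rebuilt over two parsing passes by one
-- parse into flat entries plus three derived read-only structures (occurrence list, first-occurrence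
-- order list for the ?fv ids, set of variables spanning two tuples) — an alternative decomposition.

-- shared string fragments both Pythons contain literally
-- rule[:-1].split(":-")[1].split(", ")  (the [1] raises IndexError unless ":-" occurs; Pre_ excludes)
def pvTuples (rule : String) : List (List Char) :=
  PySem.Chars.splitOn ((PySem.Chars.splitOn rule.toList.dropLast [':', '-']).getD 1 []) [',', ' ']

-- ",".join(r.split(",")[:-1]).replace("'", "")
def pvClean (t : List Char) : List Char :=
  PySem.Chars.replace (PySem.Chars.join [','] ((PySem.Chars.splitOn t [',']).dropLast)) ['\''] []

-- pred = pred[1:] if pred.startswith("(") else pred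
def pvStrip (p : List Char) : List Char :=
  if PySem.Chars.startswith p ['('] then p.tail else p

-- "?arg{}".format(class_args.index(arg))
def pvFmtClass (ca : List (List Char)) (arg : List Char) : List Char :=
  '?' :: 'a' :: 'r' :: 'g' :: PySem.Int.toChars (((PySem.List.index? ca arg).getD 0 : Nat) : Int)

-- ===== PORT A =====
-- "_" if first == last else "?fv{}".format(id_arg)  (KeyError impossible inside Pre_; default is junk)
def pvFmtFree (fva : PySem.Dict (List Char) (Int × Int × Int)) (arg : List Char) : List Char :=
  match fva.getD arg (0, 0, 0) with
  | (id_arg, first_time, last_time) =>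
      if first_time = last_time then ['_'] else '?' :: 'f' :: 'v' :: PySem.Int.toChars id_arg

-- the body of A's first-pass innermost loop (over the args of one predicate)
def pvArgStepA (ca : List (List Char)) (i : Int)
    (st : PySem.Dict (List Char) (Int × Int × Int) × Int) (arg : List Char) :
    PySem.Dict (List Char) (Int × Int × Int) × Int :=
  if arg ∈ ca then st else
  match st.1.get? arg with
  | none => (st.1.insert arg (st.2 + 1, i, i), st.2 + 1)
  | some (id_arg, first_time, _) => (st.1.insert arg (id_arg, first_time, i), st.2)

-- the body of A's first-pass loop over the predicates of one rule tuple
def pvPredStepA (ca : List (List Char)) (i : Int)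
    (st : PySem.Dict (List Char) (Int × Int × Int) × Int) (pred : List Char) :
    PySem.Dict (List Char) (Int × Int × Int) × Int :=
  let pred := pvStrip pred
  if pred = [] then st else
  -- pred.replace(")", "").split("(") unpacked into (pred_name, args): exactly 2 parts inside Pre_
  let args := (PySem.Chars.splitOn (PySem.Chars.replace pred [')'] []) ['(']).getD 1 []
  (PySem.Chars.splitOn args [',']).foldl (pvArgStepA ca i) st

-- the body of A's second-pass loop over the predicates of one rule tuple
def pvEmitStepA (ca : List (List Char)) (fva : PySem.Dict (List Char) (Int × Int × Int))
    (acc : List (List Char)) (pred : List Char) : List (List Char) :=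
  let pred := pvStrip pred
  if pred = [] then acc else
  let parts := PySem.Chars.splitOn (PySem.Chars.replace pred [')'] []) ['(']
  let new_args :=
    (PySem.Chars.splitOn (parts.getD 1 []) [',']).foldl (fun na arg =>
      if arg ∈ ca then na ++ [pvFmtClass ca arg]
      else na ++ [pvFmtFree fva arg]) []
  acc ++ [parts.getD 0 [] ++ '(' :: PySem.Chars.join [',', ' '] new_args ++ [')']]

def transform_hard_rule (rule : String) (class_args : List String) : String :=
  if PySem.Str.isIn ":-" rule = false then "True" else
  let ca := class_args.map String.toList
  let rule_tuples := pvTuples rule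
  -- first pass: build free_vars_args
  let st :=
    (PySem.List.enumerate rule_tuples 0).foldl (fun st p =>
      (PySem.Chars.splitOn (pvClean p.2) [')', ',']).foldl (pvPredStepA ca p.1) st)
      ((PySem.Dict.empty : PySem.Dict (List Char) (Int × Int × Int)), (0 : Int))
  -- second pass: rebuild the predicates
  let new_rule_tuples :=
    (PySem.List.enumerate rule_tuples 0).foldl (fun acc p =>
      (PySem.Chars.splitOn (pvClean p.2 ++ [')']) [')', ',']).foldl (pvEmitStepA ca st.1) acc)
      ([] : List (List Char))
  String.ofList (PySem.Chars.join [','] new_rule_tuples)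

-- ===== PORT B =====
-- entries.append((i, pred_name, args.split(","))) over the single parsing pass
def pvEntries (rule : String) : List (Int × List Char × List (List Char)) :=
  (PySem.List.enumerate (pvTuples rule) 0).foldl (fun es p =>
    (PySem.Chars.splitOn (pvClean p.2) [')', ',']).foldl (fun es pred =>
      let pred := pvStrip pred
      if pred = [] then es else
      let parts := PySem.Chars.splitOn (PySem.Chars.replace pred [')'] []) ['(']
      es ++ [(p.1, parts.getD 0 [], PySem.Chars.splitOn (parts.getD 1 []) [','])]) es) []

-- occ = [(i, a) for (i, _, al) in entries for a in al if a not in class_args]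
def pvOcc (ca : List (List Char)) (entries : List (Int × List Char × List (List Char))) :
    List (Int × List Char) :=
  entries.flatMap (fun e => (e.2.2.filter (fun a => decide (a ∉ ca))).map (fun a => (e.1, a)))

-- seen: distinct free vars in first-occurrence order
def pvSeen (occ : List (Int × List Char)) : List (List Char) :=
  occ.foldl (fun s p => if p.2 ∈ s then s else s ++ [p.2]) []

-- multi = {a for (i, a) in occ for (j, b) in occ if b == a and j != i}
def pvMulti (occ : List (Int × List Char)) : PySem.Set (List Char) :=
  PySem.Set.ofList (occ.flatMap (fun p =>
    occ.flatMap (fun q => if q.2 = p.2 ∧ q.1 ≠ p.1 then [p.2] else [])))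

def pvRender (ca : List (List Char)) (seen : List (List Char)) (multi : PySem.Set (List Char))
    (a : List Char) : List Char :=
  if a ∈ ca then pvFmtClass ca a
  else if a ∈ multi then
    '?' :: 'f' :: 'v' :: PySem.Int.toChars (((PySem.List.index? seen a).getD 0 + 1 : Nat) : Int)
  else ['_']

def transform_hard_rule_alt (rule : String) (class_args : List String) : String :=
  if PySem.Str.isIn ":-" rule = false then "True" else
  let ca := class_args.map String.toList
  let entries := pvEntries rule
  let occ := pvOcc ca entries
  let seen := pvSeen occ
  let multi := pvMulti occ
  String.ofList (PySem.Chars.join [','] (entries.map (fun e =>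
    e.2.1 ++ '(' :: PySem.Chars.join [',', ' '] (e.2.2.map (pvRender ca seen multi)) ++ [')'])))

-- ===== PRECONDITION & SPEC =====
-- Pre_ = exactly the inputs on which the Python A returns: either no ":-" at all, or ":-" still occurs
-- after dropping the last character (else the [1] raises IndexError) and in every tuple every processed
-- predicate splits into exactly (name, args) at one '(' (else the unpack raises ValueError) and the last
-- predicate chunk is still nonempty after stripping (else the second pass raises on the appended ")").
def Pre_transform_hard_rule (rule : String) (class_args : List String) : Prop :=
  PySem.Str.isIn ":-" rule = false ∨
  (PySem.Chars.isIn [':', '-'] rule.toList.dropLast = true ∧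
   ∀ t ∈ pvTuples rule,
     (∀ p ∈ PySem.Chars.splitOn (pvClean t) [')', ','],
        pvStrip p ≠ [] →
        (PySem.Chars.splitOn ((pvStrip p).filter (· ≠ ')')) ['(']).length = 2) ∧
     pvStrip ((PySem.Chars.splitOn (pvClean t) [')', ',']).getLastD []) ≠ [])
instance (rule : String) (class_args : List String) : Decidable (Pre_transform_hard_rule rule class_args) := by
  unfold Pre_transform_hard_rule; infer_instance

def pvWitness_transform_hard_rule : String × List String :=
  ("cls(A) :- p(B,A),q(B,'x'), (r(B,C)),s(C,'y').", ["A"])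

def Spec_transform_hard_rule (rule : String) (class_args : List String) (out : String) : Prop := out = transform_hard_rule_alt rule class_args
instance (rule : String) (class_args : List String) (out : String) : Decidable (Spec_transform_hard_rule rule class_args out) := by unfold Spec_transform_hard_rule; infer_instance

-- ===== CLAIM (what is proved, stated in full; the proofs are below) =====
def Claim_equal_transform_hard_rule : Prop := ∀ (rule : String) (class_args : List String), Dom_transform_hard_rule rule class_args → Pre_transform_hard_rule rule class_args → Spec_transform_hard_rule rule class_args (transform_hard_rule rule class_args)


-- ===== LEMMAS AND PROOFS =====

-- ---------- exact characterisation of the split/replace primitives (shared by both ports) ----------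

def pvSplit2 (a b : Char) (l : List Char) : List (List Char) :=
  match l with
  | [] => [[]]
  | c :: rest =>
    if [a, b].isPrefixOf (c :: rest) then [] :: pvSplit2 a b (rest.drop 1)
    else
      match pvSplit2 a b rest with
      | [] => [[c]]
      | h :: t => (c :: h) :: t
termination_by l.length
decreasing_by
  · simp only [List.length_cons, List.length_drop]; omega
  · simp only [List.length_cons]; omega

theorem pvSplit2_ne_nil (a b : Char) : ∀ l, pvSplit2 a b l ≠ []
  | [] => by simp [pvSplit2]
  | c :: rest => by
    rw [pvSplit2]
    split
    · simp
    · cases pvSplit2 a b rest <;> simp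

theorem pvGo (a b : Char) : ∀ (fuel : Nat) (l cur : List Char) (acc : List (List Char)), l.length < fuel →
    PySem.Chars.splitOn.go [a, b] fuel l cur acc
      = acc.reverse ++ ((cur.reverse ++ (pvSplit2 a b l).headI) :: (pvSplit2 a b l).tail) := by
  intro fuel
  induction fuel with
  | zero => intro l cur acc h; omega
  | succ n ih =>
    intro l cur acc h
    match l with
    | [] =>
      rw [PySem.Chars.splitOn.go]
      · simp [pvSplit2]
      · omega
    | c :: rest =>
      rw [PySem.Chars.splitOn.go]
      by_cases hp : [a, b].isPrefixOf (c :: rest)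
      · rw [if_pos hp]
        have h2 : List.drop [a, b].length (c :: rest) = rest.drop 1 := by simp
        rw [h2, ih (rest.drop 1) [] (cur.reverse :: acc) (by simp at h ⊢; omega)]
        rw [pvSplit2, if_pos hp]
        have hne := pvSplit2_ne_nil a b (List.drop 1 rest)
        cases hS : pvSplit2 a b (List.drop 1 rest) with
        | nil => exact absurd hS hne
        | cons h t => simp
      · rw [if_neg hp]
        rw [ih rest (c :: cur) acc (by simp at h ⊢; omega)]
        rw [pvSplit2, if_neg hp]
        have hne := pvSplit2_ne_nil a b rest
        cases hS : pvSplit2 a b rest with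
        | nil => exact absurd hS hne
        | cons hd t => simp

theorem pvSplitOn_eq (a b : Char) (l : List Char) :
    PySem.Chars.splitOn l [a, b] = pvSplit2 a b l := by
  have := pvGo a b (l.length + 1) l [] [] (by omega)
  rw [PySem.Chars.splitOn, this]
  cases hS : pvSplit2 a b l with
  | nil => exact absurd hS (pvSplit2_ne_nil a b l)
  | cons h t => simp

def pvAppLast (xs : List (List Char)) (c : Char) : List (List Char) :=
  match xs with
  | [] => []
  | [x] => [x ++ [c]]
  | x :: y :: t => x :: pvAppLast (y :: t) c

theorem pvAppLast_cons (x : List Char) (xs : List (List Char)) (c : Char) (h : xs ≠ []) :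
    pvAppLast (x :: xs) c = x :: pvAppLast xs c := by
  cases xs with
  | nil => exact absurd rfl h
  | cons y t => rfl

theorem pvIsPrefixOf_append_last (a b c : Char) (hc : c ≠ b) (l : List Char) :
    [a, b].isPrefixOf (l ++ [c]) = [a, b].isPrefixOf l := by
  match l with
  | [] => simp [List.isPrefixOf]
  | [x] => simp [List.isPrefixOf]; exact fun _ h => hc h.symm
  | x :: y :: t => simp [List.isPrefixOf]

theorem pvSplit2_append_last (a b c : Char) (hc : c ≠ b) : ∀ l,
    pvSplit2 a b (l ++ [c]) = pvAppLast (pvSplit2 a b l) c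
  | [] => by simp [pvSplit2, pvAppLast, List.isPrefixOf]
  | ch :: rest => by
    rw [List.cons_append, pvSplit2]
    conv_rhs => rw [pvSplit2]
    have hpre : [a, b].isPrefixOf (ch :: (rest ++ [c])) = [a, b].isPrefixOf (ch :: rest) := by
      rw [← List.cons_append]; exact pvIsPrefixOf_append_last a b c hc (ch :: rest)
    rw [hpre]
    by_cases hp : [a, b].isPrefixOf (ch :: rest)
    · rw [if_pos hp, if_pos hp]
      have hrest : rest ≠ [] := by
        intro he; subst he
        simp [List.isPrefixOf] at hp
      have hdrop : (rest ++ [c]).drop 1 = rest.drop 1 ++ [c] := by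
        exact List.drop_append_of_le_length (by cases rest <;> simp_all)
      rw [hdrop, pvSplit2_append_last a b c hc (rest.drop 1)]
      rw [pvAppLast_cons _ _ _ (pvSplit2_ne_nil a b (rest.drop 1))]
    · rw [if_neg hp, if_neg hp]
      rw [pvSplit2_append_last a b c hc rest]
      cases hS : pvSplit2 a b rest with
      | nil => exact absurd hS (pvSplit2_ne_nil a b rest)
      | cons x xs =>
        cases xs with
        | nil => simp [pvAppLast]
        | cons y t =>
          rw [pvAppLast_cons x (y :: t) c (by simp), pvAppLast_cons (ch :: x) (y :: t) c (by simp)]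
termination_by l => l.length
decreasing_by
  · simp only [List.length_cons, List.length_drop]; omega
  · simp only [List.length_cons]; omega

theorem pvReplaceGo (c : Char) : ∀ (fuel : Nat) (l acc : List Char), l.length ≤ fuel →
    PySem.Chars.replace.go [c] [] fuel l acc = acc.reverse ++ l.filter (· ≠ c) := by
  intro fuel
  induction fuel with
  | zero =>
    intro l acc h
    rw [PySem.Chars.replace.go]
    have : l = [] := List.length_eq_zero_iff.mp (by omega)
    subst this; simp
  | succ n ih =>
    intro l acc h
    match l with
    | [] =>
      rw [PySem.Chars.replace.go]
      · simp
      · omega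
    | ch :: t =>
      rw [PySem.Chars.replace.go]
      by_cases hp : [c].isPrefixOf (ch :: t)
      · have hce : c = ch := by simpa [List.isPrefixOf] using hp
        rw [if_pos hp]
        have hd : List.drop [c].length (ch :: t) = t := by simp
        rw [show ([] : List Char).reverse ++ acc = acc from by simp, hd,
            ih t acc (by simp at h; omega)]
        subst hce
        simp
      · have hce : ¬ c = ch := by simpa [List.isPrefixOf] using hp
        rw [if_neg hp, ih t (ch :: acc) (by simp at h; omega)]
        simp [Ne.symm hce]

theorem pvReplace_eq_filter (c : Char) (l : List Char) :
    PySem.Chars.replace l [c] [] = l.filter (· ≠ c) := by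
  rw [PySem.Chars.replace]
  simp only [List.isEmpty_cons]
  rw [pvReplaceGo c l.length l [] le_rfl]
  simp

-- ---------- the canonical parse both ports compute ----------

-- the (name, args) entries one raw predicate chunk contributes
def pvParsePred (p : List Char) : List (List Char × List (List Char)) :=
  if pvStrip p = [] then []
  else
    let parts := PySem.Chars.splitOn ((pvStrip p).filter (· ≠ ')')) ['(']
    [(parts.getD 0 [], PySem.Chars.splitOn (parts.getD 1 []) [','])]

theorem pvStrip_append (p : List Char) (hp : p ≠ []) :
    pvStrip (p ++ [')']) = pvStrip p ++ [')'] := by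
  unfold pvStrip
  cases p with
  | nil => exact absurd rfl hp
  | cons c t =>
    by_cases hs : PySem.Chars.startswith (c :: t) ['(']
    · have : '(' = c := by simpa [PySem.Chars.startswith, List.isPrefixOf] using hs
      subst this
      simp [PySem.Chars.startswith, List.isPrefixOf]
    · have hne : ¬ '(' = c := by simpa [PySem.Chars.startswith, List.isPrefixOf] using hs
      simp [PySem.Chars.startswith, List.isPrefixOf, hne]

theorem pvParsePred_append (p : List Char) (h : pvStrip p ≠ []) :
    pvParsePred (p ++ [')']) = pvParsePred p := by
  have hp : p ≠ [] := by intro he; subst he; simp [pvStrip] at h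
  unfold pvParsePred
  rw [pvStrip_append p hp]
  have hf : (pvStrip p ++ [')']).filter (· ≠ ')') = (pvStrip p).filter (· ≠ ')') := by
    simp [List.filter_append]
  rw [hf]
  simp [h]

theorem pvAppLast_flatMap : ∀ (xs : List (List Char)), xs ≠ [] →
    pvStrip (xs.getLastD []) ≠ [] →
    (pvAppLast xs ')').flatMap pvParsePred = xs.flatMap pvParsePred
  | [], h, _ => absurd rfl h
  | [x], _, h2 => by
    simp only [pvAppLast, List.flatMap_cons, List.flatMap_nil, List.append_nil]
    exact pvParsePred_append x (by simpa using h2)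
  | x :: y :: t, _, h2 => by
    rw [pvAppLast_cons x (y :: t) ')' (by simp)]
    rw [List.flatMap_cons, List.flatMap_cons]
    rw [pvAppLast_flatMap (y :: t) (by simp) (by simpa using h2)]

theorem pvTupleFix (t : List Char)
    (h2 : pvStrip ((PySem.Chars.splitOn (pvClean t) [')', ',']).getLastD []) ≠ []) :
    (PySem.Chars.splitOn (pvClean t ++ [')']) [')', ',']).flatMap pvParsePred
      = (PySem.Chars.splitOn (pvClean t) [')', ',']).flatMap pvParsePred := by
  rw [pvSplitOn_eq, pvSplitOn_eq, pvSplit2_append_last ')' ',' ')' (by decide)]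
  refine pvAppLast_flatMap _ (pvSplit2_ne_nil _ _ _) ?_
  rw [pvSplitOn_eq] at h2
  exact h2

-- the flatMap form of B's stored parse
def pvEntriesF (rule : String) : List (Int × List Char × List (List Char)) :=
  (PySem.List.enumerate (pvTuples rule) 0).flatMap (fun p =>
    (PySem.Chars.splitOn (pvClean p.2) [')', ',']).flatMap (fun pred =>
      (pvParsePred pred).map (fun e => (p.1, e))))

theorem pvEntriesInner (i : Int) : ∀ (preds : List (List Char)) (es : List (Int × List Char × List (List Char))),
    preds.foldl (fun es pred =>
      let pred := pvStrip pred
      if pred = [] then es else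
      let parts := PySem.Chars.splitOn (PySem.Chars.replace pred [')'] []) ['(']
      es ++ [(i, parts.getD 0 [], PySem.Chars.splitOn (parts.getD 1 []) [','])]) es
    = es ++ preds.flatMap (fun pred => (pvParsePred pred).map (fun e => (i, e)))
  | [], es => by simp
  | p :: preds, es => by
    rw [List.foldl_cons, pvEntriesInner i preds, List.flatMap_cons]
    simp only [pvParsePred]
    by_cases h : pvStrip p = []
    · simp [h]
    · simp only [h, if_false]
      rw [pvReplace_eq_filter]
      simp

theorem pvEntriesOuter : ∀ (L : List (Int × List Char)) (es : List (Int × List Char × List (List Char))),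
    L.foldl (fun es p =>
      (PySem.Chars.splitOn (pvClean p.2) [')', ',']).foldl (fun es pred =>
        let pred := pvStrip pred
        if pred = [] then es else
        let parts := PySem.Chars.splitOn (PySem.Chars.replace pred [')'] []) ['(']
        es ++ [(p.1, parts.getD 0 [], PySem.Chars.splitOn (parts.getD 1 []) [','])]) es) es
    = es ++ L.flatMap (fun p =>
        (PySem.Chars.splitOn (pvClean p.2) [')', ',']).flatMap (fun pred =>
          (pvParsePred pred).map (fun e => (p.1, e))))
  | [], es => by simp
  | p :: L, es => by
    rw [List.foldl_cons, pvEntriesInner p.1, pvEntriesOuter L]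
    simp

theorem pvEntries_eq (rule : String) : pvEntries rule = pvEntriesF rule := by
  unfold pvEntries pvEntriesF
  rw [pvEntriesOuter]
  simp

-- ---------- A's emission pass reduced to a map over the canonical parse ----------

def pvFmt (ca : List (List Char)) (fva : PySem.Dict (List Char) (Int × Int × Int))
    (e : List Char × List (List Char)) : List Char :=
  e.1 ++ '(' :: PySem.Chars.join [',', ' ']
    (e.2.map (fun arg => if arg ∈ ca then pvFmtClass ca arg else pvFmtFree fva arg)) ++ [')']

theorem pvNewArgsFold (ca : List (List Char)) (fva : PySem.Dict (List Char) (Int × Int × Int)) :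
    ∀ (args : List (List Char)) (na : List (List Char)),
    args.foldl (fun na arg => if arg ∈ ca then na ++ [pvFmtClass ca arg] else na ++ [pvFmtFree fva arg]) na
      = na ++ args.map (fun arg => if arg ∈ ca then pvFmtClass ca arg else pvFmtFree fva arg)
  | [], na => by simp
  | a :: args, na => by
    rw [List.foldl_cons, pvNewArgsFold ca fva args, List.map_cons]
    by_cases h : a ∈ ca <;> simp [h]

theorem pvEmitStepA_eq (ca : List (List Char)) (fva : PySem.Dict (List Char) (Int × Int × Int))
    (acc : List (List Char)) (pred : List Char) :
    pvEmitStepA ca fva acc pred = acc ++ (pvParsePred pred).map (pvFmt ca fva) := by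
  unfold pvEmitStepA pvParsePred pvFmt
  by_cases h : pvStrip pred = []
  · simp [h]
  · simp only [h, if_false]
    rw [pvReplace_eq_filter, pvNewArgsFold]
    simp

theorem pvEmitFoldA (ca : List (List Char)) (fva : PySem.Dict (List Char) (Int × Int × Int)) :
    ∀ (preds : List (List Char)) (acc : List (List Char)),
    preds.foldl (pvEmitStepA ca fva) acc = acc ++ (preds.flatMap pvParsePred).map (pvFmt ca fva)
  | [], acc => by simp
  | p :: preds, acc => by
    rw [List.foldl_cons, pvEmitStepA_eq, pvEmitFoldA ca fva preds]
    simp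

theorem pvEmitOuterA (ca : List (List Char)) (fva : PySem.Dict (List Char) (Int × Int × Int)) :
    ∀ (L : List (Int × List Char)) (acc : List (List Char)),
    L.foldl (fun acc p => (PySem.Chars.splitOn (pvClean p.2 ++ [')']) [')', ',']).foldl (pvEmitStepA ca fva) acc) acc
      = acc ++ (L.flatMap (fun p => (PySem.Chars.splitOn (pvClean p.2 ++ [')']) [')', ',']).flatMap pvParsePred)).map (pvFmt ca fva)
  | [], acc => by simp
  | p :: L, acc => by
    rw [List.foldl_cons, pvEmitFoldA, pvEmitOuterA ca fva L]
    simp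

-- ---------- A's first pass reduced to a fold over the flat occurrence list ----------

def pvOccStep (st : PySem.Dict (List Char) (Int × Int × Int) × Int) (p : Int × List Char) :
    PySem.Dict (List Char) (Int × Int × Int) × Int :=
  match st.1.get? p.2 with
  | none => (st.1.insert p.2 (st.2 + 1, p.1, p.1), st.2 + 1)
  | some (id_arg, first_time, _) => (st.1.insert p.2 (id_arg, first_time, p.1), st.2)

theorem pvArgsFoldA (ca : List (List Char)) (i : Int) :
    ∀ (args : List (List Char)) (σ : PySem.Dict (List Char) (Int × Int × Int) × Int),
    args.foldl (pvArgStepA ca i) σ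
      = ((args.filter (fun a => decide (a ∉ ca))).map (fun a => (i, a))).foldl pvOccStep σ
  | [], σ => by simp
  | a :: args, σ => by
    rw [List.foldl_cons, pvArgsFoldA ca i args]
    by_cases h : a ∈ ca
    · simp [pvArgStepA, h]
    · have hstep : pvArgStepA ca i σ a = pvOccStep σ (i, a) := by
        simp [pvArgStepA, pvOccStep, h]
      simp [h, hstep]

theorem pvPredFoldA (ca : List (List Char)) (i : Int) (σ : PySem.Dict (List Char) (Int × Int × Int) × Int)
    (pred : List Char) :
    pvPredStepA ca i σ pred
      = (pvOcc ca ((pvParsePred pred).map (fun e => (i, e)))).foldl pvOccStep σ := by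
  unfold pvPredStepA pvParsePred pvOcc
  by_cases h : pvStrip pred = []
  · simp [h]
  · simp only [h, if_false]
    rw [pvReplace_eq_filter, pvArgsFoldA]
    simp

theorem pvPredsFoldA (ca : List (List Char)) (i : Int) :
    ∀ (preds : List (List Char)) (σ : PySem.Dict (List Char) (Int × Int × Int) × Int),
    preds.foldl (pvPredStepA ca i) σ
      = (pvOcc ca (preds.flatMap (fun pred => (pvParsePred pred).map (fun e => (i, e))))).foldl pvOccStep σ
  | [], σ => by simp [pvOcc]
  | p :: preds, σ => by
    rw [List.foldl_cons, pvPredFoldA, pvPredsFoldA ca i preds, List.flatMap_cons]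
    unfold pvOcc
    rw [List.flatMap_append, List.foldl_append]

theorem pvOuterFoldA (ca : List (List Char)) :
    ∀ (L : List (Int × List Char)) (σ : PySem.Dict (List Char) (Int × Int × Int) × Int),
    L.foldl (fun st p => (PySem.Chars.splitOn (pvClean p.2) [')', ',']).foldl (pvPredStepA ca p.1) st) σ
      = (pvOcc ca (L.flatMap (fun p =>
          (PySem.Chars.splitOn (pvClean p.2) [')', ',']).flatMap (fun pred =>
            (pvParsePred pred).map (fun e => (p.1, e)))))).foldl pvOccStep σ
  | [], σ => by simp [pvOcc]
  | p :: L, σ => by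
    rw [List.foldl_cons, pvPredsFoldA, pvOuterFoldA ca L, List.flatMap_cons]
    unfold pvOcc
    rw [List.flatMap_append, List.foldl_append]

-- ---------- characterisation of the dict built by pvOccStep ----------

def pvFirstI (occ : List (Int × List Char)) (a : List Char) : Int :=
  ((List.find? (fun p => decide (p.2 = a)) occ).map Prod.fst).getD 0

def pvLastI (occ : List (Int × List Char)) (a : List Char) : Int :=
  ((List.find? (fun p => decide (p.2 = a)) occ.reverse).map Prod.fst).getD 0

theorem pvSeen_append (occ : List (Int × List Char)) (x : Int × List Char) :
    pvSeen (occ ++ [x]) = if x.2 ∈ pvSeen occ then pvSeen occ else pvSeen occ ++ [x.2] := by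
  simp [pvSeen, List.foldl_append]

theorem mem_pvSeen : ∀ (occ : List (Int × List Char)) (a : List Char),
    a ∈ pvSeen occ ↔ ∃ p ∈ occ, p.2 = a := by
  intro occ
  induction occ using List.reverseRecOn with
  | nil => simp [pvSeen]
  | append_singleton occ x ih =>
    intro a
    rw [pvSeen_append]
    by_cases h : x.2 ∈ pvSeen occ
    · rw [if_pos h, ih]
      constructor
      · rintro ⟨p, hp, rfl⟩
        exact ⟨p, List.mem_append.mpr (Or.inl hp), rfl⟩
      · rintro ⟨p, hp, rfl⟩
        rcases List.mem_append.mp hp with hp | hp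
        · exact ⟨p, hp, rfl⟩
        · rw [List.mem_singleton] at hp
          obtain ⟨q, hq, hqa⟩ := (ih x.2).mp h
          exact ⟨q, hq, by rw [hqa, hp]⟩
    · rw [if_neg h, List.mem_append, ih, List.mem_singleton]
      constructor
      · rintro (⟨p, hp, rfl⟩ | rfl)
        · exact ⟨p, List.mem_append.mpr (Or.inl hp), rfl⟩
        · exact ⟨x, List.mem_append.mpr (Or.inr (List.mem_singleton.mpr rfl)), rfl⟩
      · rintro ⟨p, hp, rfl⟩
        rcases List.mem_append.mp hp with hp | hp
        · exact Or.inl ⟨p, hp, rfl⟩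
        · rw [List.mem_singleton] at hp
          subst hp
          exact Or.inr rfl

-- how pvFirstI / pvLastI evolve when one occurrence is appended
theorem pvFindOcc {occ : List (Int × List Char)} {a : List Char}
    (h : ∃ p ∈ occ, p.2 = a) : (List.find? (fun p => decide (p.2 = a)) occ).isSome := by
  rw [List.find?_isSome]
  obtain ⟨p, hp, hpa⟩ := h
  exact ⟨p, hp, by simp [hpa]⟩

theorem pvFindNone {occ : List (Int × List Char)} {a : List Char}
    (h : ¬ ∃ p ∈ occ, p.2 = a) : List.find? (fun p => decide (p.2 = a)) occ = none := by
  rw [List.find?_eq_none]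
  intro p hp
  simp only [decide_eq_true_eq]
  exact fun hpa => h ⟨p, hp, hpa⟩

theorem pvFirstI_append_of_mem {occ : List (Int × List Char)} {a : List Char}
    (x : Int × List Char) (h : ∃ p ∈ occ, p.2 = a) :
    pvFirstI (occ ++ [x]) a = pvFirstI occ a := by
  obtain ⟨pf, hpf⟩ := Option.isSome_iff_exists.mp (pvFindOcc h)
  unfold pvFirstI
  rw [List.find?_append, hpf]
  rfl

theorem pvLastI_append_of_ne {occ : List (Int × List Char)} {a : List Char}
    (x : Int × List Char) (h : a ≠ x.2) :
    pvLastI (occ ++ [x]) a = pvLastI occ a := by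
  unfold pvLastI
  rw [List.reverse_append]
  simp only [List.reverse_singleton, List.singleton_append]
  rw [List.find?_cons_of_neg (by simp only [decide_eq_true_eq]; exact Ne.symm h)]

theorem pvFirstI_append_self {occ : List (Int × List Char)} (x : Int × List Char)
    (h : ¬ ∃ p ∈ occ, p.2 = x.2) :
    pvFirstI (occ ++ [x]) x.2 = x.1 := by
  unfold pvFirstI
  rw [List.find?_append, pvFindNone h, List.find?_cons_of_pos (by simp)]
  rfl

theorem pvLastI_append_self (occ : List (Int × List Char)) (x : Int × List Char) :
    pvLastI (occ ++ [x]) x.2 = x.1 := by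
  unfold pvLastI
  rw [List.reverse_append]
  simp only [List.reverse_singleton, List.singleton_append]
  rw [List.find?_cons_of_pos (by simp)]
  rfl

theorem pvOccStep_some {S : PySem.Dict (List Char) (Int × Int × Int) × Int}
    {p : Int × List Char} {id f l : Int} (hg : S.1.get? p.2 = some (id, f, l)) :
    pvOccStep S p = (S.1.insert p.2 (id, f, p.1), S.2) := by
  unfold pvOccStep
  rw [hg]

theorem pvOccStep_none {S : PySem.Dict (List Char) (Int × Int × Int) × Int}
    {p : Int × List Char} (hg : S.1.get? p.2 = none) :
    pvOccStep S p = (S.1.insert p.2 (S.2 + 1, p.1, p.1), S.2 + 1) := by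
  unfold pvOccStep
  rw [hg]

theorem pvDictChar : ∀ (occ : List (Int × List Char)),
    ((occ.foldl pvOccStep (PySem.Dict.empty, 0)).2 = ((pvSeen occ).length : Int))
  ∧ ∀ a, (occ.foldl pvOccStep (PySem.Dict.empty, 0)).1.get? a
        = (PySem.List.index? (pvSeen occ) a).map
            (fun k : Nat => (((k : Int) + 1 : Int), pvFirstI occ a, pvLastI occ a)) := by
  intro occ
  induction occ using List.reverseRecOn with
  | nil =>
    refine ⟨by simp [pvSeen], fun a => ?_⟩
    rw [(PySem.List.index?_eq_none_iff _ _).mpr (by simp [pvSeen])]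
    simp [PySem.Dict.get?_empty]
  | append_singleton occ x ih =>
    obtain ⟨ihn, ihG⟩ := ih
    have hfold : (occ ++ [x]).foldl pvOccStep (PySem.Dict.empty, 0)
        = pvOccStep (occ.foldl pvOccStep (PySem.Dict.empty, 0)) x := by
      rw [List.foldl_append]
      rfl
    by_cases hmem : x.2 ∈ pvSeen occ
    · -- key already present: overwrite last, keep id/first/counter
      obtain ⟨k, hk⟩ := Option.isSome_iff_exists.mp
        ((PySem.List.index?_isSome_iff _ _).mpr hmem)
      have hg : (occ.foldl pvOccStep (PySem.Dict.empty, 0)).1.get? x.2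
          = some ((k : Int) + 1, pvFirstI occ x.2, pvLastI occ x.2) := by
        rw [ihG x.2, hk]
        rfl
      have hstep := pvOccStep_some hg
      refine ⟨?_, fun a => ?_⟩
      · rw [hfold, hstep, pvSeen_append, if_pos hmem]
        exact ihn
      · rw [hfold, hstep, pvSeen_append, if_pos hmem]
        by_cases hax : a = x.2
        · subst hax
          rw [PySem.Dict.get?_insert_self, hk,
              pvFirstI_append_of_mem x ((mem_pvSeen occ x.2).mp hmem),
              pvLastI_append_self occ x]
          rfl
        · rw [PySem.Dict.get?_insert_of_ne _ _ hax, ihG a]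
          by_cases hmema : a ∈ pvSeen occ
          · rw [pvFirstI_append_of_mem x ((mem_pvSeen occ a).mp hmema),
                pvLastI_append_of_ne x hax]
          · rw [(PySem.List.index?_eq_none_iff _ _).mpr hmema]
            simp
    · -- new key: fresh id, first = last = x.1, counter bumps
      have hg : (occ.foldl pvOccStep (PySem.Dict.empty, 0)).1.get? x.2 = none := by
        rw [ihG x.2, (PySem.List.index?_eq_none_iff _ _).mpr hmem]
        rfl
      have hstep := pvOccStep_none hg
      have hnomem : ¬ ∃ p ∈ occ, p.2 = x.2 := fun h => hmem ((mem_pvSeen occ x.2).mpr h)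
      refine ⟨?_, fun a => ?_⟩
      · rw [hfold, hstep, pvSeen_append, if_neg hmem, ihn]
        simp only [List.length_append, List.length_singleton]
        push_cast
        ring
      · rw [hfold, hstep, pvSeen_append, if_neg hmem]
        by_cases hax : a = x.2
        · subst hax
          rw [PySem.Dict.get?_insert_self,
              PySem.List.index?_append_singleton_self _ _ hmem,
              pvFirstI_append_self x hnomem, pvLastI_append_self occ x, ihn]
          rfl
        · rw [PySem.Dict.get?_insert_of_ne _ _ hax, ihG a]
          by_cases hmema : a ∈ pvSeen occ
          · rw [PySem.List.index?_append_of_mem _ hmema,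
                pvFirstI_append_of_mem x ((mem_pvSeen occ a).mp hmema),
                pvLastI_append_of_ne x hax]
          · rw [(PySem.List.index?_eq_none_iff _ _).mpr hmema,
                (PySem.List.index?_eq_none_iff _ _).mpr (by
                  simp only [List.mem_append, List.mem_singleton]
                  rintro (h | h)
                  · exact hmema h
                  · exact hax h)]
            simp

-- ---------- monotone tuple indices and the multi/first-last correspondence ----------

theorem pvPairwiseLe {A B : Type} (L : List (Int × A)) (f : Int × A → List (Int × B))
    (hL : L.Pairwise (fun p q => p.1 ≤ q.1)) (hf : ∀ p x, x ∈ f p → x.1 = p.1) :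
    (L.flatMap f).Pairwise (fun p q => p.1 ≤ q.1) := by
  induction L with
  | nil => simp
  | cons p L ih =>
    rw [List.flatMap_cons]
    rcases List.pairwise_cons.mp hL with ⟨hp, hL2⟩
    rw [List.pairwise_append]
    refine ⟨?_, ih hL2, ?_⟩
    · apply List.pairwise_iff_forall_sublist.mpr
      intro a b hs
      have ha := hf p a (hs.subset (by simp))
      have hb := hf p b (hs.subset (by simp))
      omega
    · intro y hy z hz
      rcases List.mem_flatMap.mp hz with ⟨q, hq, hzq⟩
      have h1 := hp q hq
      have h2 := hf p y hy
      have h3 := hf q z hzq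
      omega

theorem pvOccPairwise (ca : List (List Char)) (rule : String) :
    (pvOcc ca (pvEntriesF rule)).Pairwise (fun p q => p.1 ≤ q.1) := by
  unfold pvOcc
  apply pvPairwiseLe
  · unfold pvEntriesF
    apply pvPairwiseLe
    · exact (PySem.List.pairwise_lt_enumerate _ _).imp (fun h => le_of_lt h)
    · intro p z hz
      rcases List.mem_flatMap.mp hz with ⟨pred, _, hzp⟩
      rcases List.mem_map.mp hzp with ⟨e, _, he⟩
      rw [← he]
  · intro e z hz
    rcases List.mem_map.mp hz with ⟨a, _, ha⟩
    rw [← ha]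

theorem pvFindBound {R : Int × List Char → Int × List Char → Prop}
    {occ : List (Int × List Char)} (h : occ.Pairwise R)
    {a : List Char} {pf : Int × List Char}
    (hf : List.find? (fun p => decide (p.2 = a)) occ = some pf) :
    ∀ q ∈ occ, q.2 = a → pf = q ∨ R pf q := by
  rcases List.find?_eq_some_iff_append.mp hf with ⟨hpf, as, bs, rfl, hbefore⟩
  intro q hq hqa
  rcases List.mem_append.mp hq with hq | hq
  · have := hbefore q hq
    simp [hqa] at this
  · rcases List.mem_cons.mp hq with rfl | hq
    · exact Or.inl rfl
    · have h2 := (List.pairwise_append.mp h).2.1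
      exact Or.inr ((List.pairwise_cons.mp h2).1 q hq)

theorem pvMultiMem_iff (occ : List (Int × List Char)) (a : List Char) :
    (a ∈ pvMulti occ) ↔ ∃ p ∈ occ, p.2 = a ∧ ∃ q ∈ occ, q.2 = p.2 ∧ q.1 ≠ p.1 := by
  unfold pvMulti
  rw [PySem.Set.mem_ofList]
  simp only [List.mem_flatMap]
  constructor
  · rintro ⟨p, hp, q, hq, hmem⟩
    by_cases hc : q.2 = p.2 ∧ q.1 ≠ p.1
    · rw [if_pos hc, List.mem_singleton] at hmem
      subst hmem
      exact ⟨p, hp, rfl, q, hq, hc⟩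
    · rw [if_neg hc] at hmem
      cases hmem
  · rintro ⟨p, hp, rfl, q, hq, hc⟩
    exact ⟨p, hp, q, hq, by rw [if_pos hc]; exact List.mem_singleton.mpr rfl⟩

theorem pvMultiIff {occ : List (Int × List Char)} (hpw : occ.Pairwise (fun p q => p.1 ≤ q.1))
    {a : List Char} (hex : ∃ p ∈ occ, p.2 = a) :
    (a ∈ pvMulti occ) ↔ pvFirstI occ a ≠ pvLastI occ a := by
  obtain ⟨pf, hpf⟩ := Option.isSome_iff_exists.mp (pvFindOcc hex)
  have hexr : ∃ p ∈ occ.reverse, p.2 = a := by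
    obtain ⟨p, hp, hpa⟩ := hex
    exact ⟨p, List.mem_reverse.mpr hp, hpa⟩
  obtain ⟨pl, hpl⟩ := Option.isSome_iff_exists.mp (pvFindOcc hexr)
  have hF : pvFirstI occ a = pf.1 := by simp [pvFirstI, hpf]
  have hL : pvLastI occ a = pl.1 := by simp [pvLastI, hpl]
  have hpfm : pf ∈ occ := List.mem_of_find?_eq_some hpf
  have hpfa : pf.2 = a := by simpa using List.find?_some hpf
  have hplm : pl ∈ occ := List.mem_reverse.mp (List.mem_of_find?_eq_some hpl)
  have hpla : pl.2 = a := by simpa using List.find?_some hpl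
  have hBoundF : ∀ q ∈ occ, q.2 = a → pf.1 ≤ q.1 := by
    intro q hq hqa
    rcases pvFindBound hpw hpf q hq hqa with rfl | hle
    · exact le_refl _
    · exact hle
  have hpwr : occ.reverse.Pairwise (fun p q : Int × List Char => q.1 ≤ p.1) :=
    List.pairwise_reverse.mpr hpw
  have hBoundL : ∀ q ∈ occ, q.2 = a → q.1 ≤ pl.1 := by
    intro q hq hqa
    rcases pvFindBound hpwr hpl q (List.mem_reverse.mpr hq) hqa with rfl | hle
    · exact le_refl _
    · exact hle
  rw [hF, hL, pvMultiMem_iff]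
  constructor
  · rintro ⟨p, hp, hpa, q, hq, hqp, hne⟩ heq
    have h1 := hBoundF p hp hpa
    have h2 := hBoundL p hp hpa
    have h3 := hBoundF q hq (hqp.trans hpa)
    have h4 := hBoundL q hq (hqp.trans hpa)
    omega
  · intro hne
    exact ⟨pf, hpfm, hpfa, pl, hplm, hpla.trans hpfa.symm, by omega⟩

-- ---------- per-argument agreement of the two renderings ----------

theorem pvArgEq (ca : List (List Char)) (rule : String) (a : List Char)
    (hocc : ∃ p ∈ pvOcc ca (pvEntriesF rule), p.2 = a) (hca : a ∉ ca) :
    pvFmtFree ((pvOcc ca (pvEntriesF rule)).foldl pvOccStep (PySem.Dict.empty, 0)).1 a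
      = pvRender ca (pvSeen (pvOcc ca (pvEntriesF rule))) (pvMulti (pvOcc ca (pvEntriesF rule))) a := by
  obtain ⟨hn, hG⟩ := pvDictChar (pvOcc ca (pvEntriesF rule))
  have hseen : a ∈ pvSeen (pvOcc ca (pvEntriesF rule)) := (mem_pvSeen _ a).mpr hocc
  obtain ⟨k, hk⟩ := Option.isSome_iff_exists.mp ((PySem.List.index?_isSome_iff _ _).mpr hseen)
  have hg := hG a
  rw [hk] at hg
  simp only [Option.map_some] at hg
  unfold pvFmtFree pvRender
  rw [PySem.Dict.getD_eq_get?_getD, hg, if_neg hca, hk]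
  simp only [Option.getD_some]
  by_cases hm : a ∈ pvMulti (pvOcc ca (pvEntriesF rule))
  · rw [if_pos hm,
        if_neg ((pvMultiIff (pvOccPairwise ca rule) hocc).mp hm)]
    have : ((k : Int) + 1) = (((k + 1 : Nat)) : Int) := by push_cast; ring
    rw [this]
  · rw [if_neg hm,
        if_pos (not_ne_iff.mp (fun hne => hm ((pvMultiIff (pvOccPairwise ca rule) hocc).mpr hne)))]

-- ---------- per-entry agreement, and the projection of the stored parse ----------

theorem pvEntriesF_proj (rule : String) :
    (pvEntriesF rule).map (fun e => e.2)
      = (PySem.List.enumerate (pvTuples rule) 0).flatMap (fun p =>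
          (PySem.Chars.splitOn (pvClean p.2) [')', ',']).flatMap pvParsePred) := by
  simp [pvEntriesF, List.map_flatMap, List.map_map, Function.comp_def]

theorem pvEntryEq (ca : List (List Char)) (rule : String)
    (e : Int × List Char × List (List Char)) (he : e ∈ pvEntriesF rule) :
    pvFmt ca ((pvOcc ca (pvEntriesF rule)).foldl pvOccStep (PySem.Dict.empty, 0)).1 e.2
      = e.2.1 ++ '(' :: PySem.Chars.join [',', ' ']
          (e.2.2.map (pvRender ca (pvSeen (pvOcc ca (pvEntriesF rule)))
            (pvMulti (pvOcc ca (pvEntriesF rule))))) ++ [')'] := by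
  unfold pvFmt
  refine congrArg (fun l => e.2.1 ++ '(' :: PySem.Chars.join [',', ' '] l ++ [')']) ?_
  apply List.map_congr_left
  intro a ha
  by_cases hc : a ∈ ca
  · simp [pvRender, hc]
  · rw [if_neg hc]
    refine pvArgEq ca rule a ⟨(e.1, a), ?_, rfl⟩ hc
    unfold pvOcc
    refine List.mem_flatMap.mpr ⟨e, he, ?_⟩
    exact List.mem_map.mpr ⟨a, List.mem_filter.mpr ⟨ha, by simp [hc]⟩, rfl⟩

-- ===== VERDICT (by name: the statement is the Claim_ definition above) =====
theorem transform_hard_rule_spec : Claim_equal_transform_hard_rule := by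
  intro rule class_args _ hpre
  unfold Spec_transform_hard_rule transform_hard_rule transform_hard_rule_alt
  by_cases hin : PySem.Str.isIn ":-" rule = false
  · rw [if_pos hin, if_pos hin]
  · rw [if_neg hin, if_neg hin]
    dsimp only
    have hgood : ∀ t ∈ pvTuples rule,
        pvStrip ((PySem.Chars.splitOn (pvClean t) [')', ',']).getLastD []) ≠ [] := by
      cases hpre with
      | inl h => exact absurd h hin
      | inr h => exact fun t ht => (h.2 t ht).2
    rw [pvOuterFoldA, pvEmitOuterA]
    simp only [List.nil_append]
    have hfix : (PySem.List.enumerate (pvTuples rule) 0).flatMap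
          (fun p => (PySem.Chars.splitOn (pvClean p.2 ++ [')']) [')', ',']).flatMap pvParsePred)
        = (PySem.List.enumerate (pvTuples rule) 0).flatMap
          (fun p => (PySem.Chars.splitOn (pvClean p.2) [')', ',']).flatMap pvParsePred) := by
      apply List.flatMap_congr
      intro p hp
      apply pvTupleFix
      apply hgood
      rcases (PySem.List.mem_enumerate_iff _ _ _).mp hp with ⟨k, hk, rfl⟩
      exact List.getElem_mem hk
    rw [hfix, pvEntries_eq, ← pvEntriesF_proj, List.map_map]
    refine congrArg String.ofList (congrArg (PySem.Chars.join [',']) ?_)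
    apply List.map_congr_left
    intro e he
    exact pvEntryEq (class_args.map String.toList) rule e he
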